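-- pv_equiv track=rewrite | github.com/anthonyceponis/bioinformatics | four-russians.py | construct_lcs_grid
-- ===== SOURCE A (Python) =====
-- from collections import defaultdict
--
-- def construct_lcs_grid(
--     u: str, v: str, first_col: list[int], first_row: list[int]
-- ) -> defaultdict:
--     """Constructs the lcs grid given strings u,v, and the initial offsets for the first row and col, to be used for the four russians technique."""
--
--     m = len(u)
--     n = len(v)
--
--     dp = defaultdict(int)
--
--     # init
--     for i in range(m + 1):
--         dp[(i, 0)] = first_col[i]
--     for j in range(n + 1):
--         dp[(0, j)] = first_row[j]
--
--     # fill table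
--     for i in range(1, m + 1):
--         for j in range(1, n + 1):
--             if u[i - 1] == v[j - 1]:
--                 dp[(i, j)] = max(dp[(i, j)], dp[(i - 1, j - 1)] + 1)
--             else:
--                 dp[(i, j)] = max(dp[(i - 1, j)], dp[(i, j - 1)])
--
--     return dp
-- ===== SOURCE B (Python) =====
-- from collections import defaultdict
--
--
-- def construct_lcs_grid(
--     u: str, v: str, first_col: list[int], first_row: list[int]
-- ) -> defaultdict:
--     """Top-down memoised version: after seeding the boundary offsets, a
--     recursive cell(i, j) computes and caches each grid entry on demand in
--     the same defaultdict; the driver just requests every cell once."""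
--
--     m = len(u)
--     n = len(v)
--
--     dp = defaultdict(int)
--     for i in range(m + 1):
--         dp[(i, 0)] = first_col[i]
--     for j in range(n + 1):
--         dp[(0, j)] = first_row[j]
--
--     def cell(i, j):
--         if i == 0 or j == 0 or (i, j) in dp:
--             return dp[(i, j)]
--         if u[i - 1] == v[j - 1]:
--             val = max(dp[(i, j)], cell(i - 1, j - 1) + 1)
--         else:
--             val = max(cell(i - 1, j), cell(i, j - 1))
--         dp[(i, j)] = val
--         return val
--
--     for i in range(1, m + 1):
--         for j in range(1, n + 1):
--             cell(i, j)
--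
--     return dp
-- ===== Notes on version B (the rewrite author's own statement) =====
-- stated objective: alternative
-- what changed: B replaces A's bottom-up double-loop fill (every cell assigned in a fixed row-major sweep) by top-down memoised recursion: a recursive cell(i, j) returns a cached/boundary entry or computes itself from its three neighbour calls and caches the result in the defaultdict, the driver merely requesting each cell once.
import Mathlib
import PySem

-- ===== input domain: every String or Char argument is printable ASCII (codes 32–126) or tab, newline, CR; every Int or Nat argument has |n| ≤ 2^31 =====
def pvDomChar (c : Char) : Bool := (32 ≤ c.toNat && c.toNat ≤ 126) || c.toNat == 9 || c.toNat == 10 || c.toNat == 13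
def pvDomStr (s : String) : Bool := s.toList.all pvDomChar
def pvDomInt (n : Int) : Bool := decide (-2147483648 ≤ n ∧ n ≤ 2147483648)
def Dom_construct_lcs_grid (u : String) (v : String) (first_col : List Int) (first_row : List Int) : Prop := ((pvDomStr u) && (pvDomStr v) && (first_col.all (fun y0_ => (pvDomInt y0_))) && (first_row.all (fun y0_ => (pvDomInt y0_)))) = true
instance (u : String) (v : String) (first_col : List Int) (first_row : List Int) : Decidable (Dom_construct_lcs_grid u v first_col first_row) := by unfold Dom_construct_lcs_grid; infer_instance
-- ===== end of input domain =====

-- B replaces A's bottom-up double-loop fill by top-down memoised recursion: a recursive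
-- cell(i, j) computes and caches each grid entry in the defaultdict on demand; objective: alternative.

-- ===== PORT A =====
def construct_lcs_grid (u : String) (v : String) (first_col : List Int) (first_row : List Int) : List (Int × Int × Int) :=
  let m : Int := PySem.Str.len u
  let n : Int := PySem.Str.len v
  let dp : PySem.Dict (Int × Int) Int := PySem.Dict.empty
  let dp := (PySem.List.pyRange 0 (m + 1) 1).foldl
    (fun d i => d.insert (i, 0) (PySem.List.pyGetD first_col i 0)) dp
  let dp := (PySem.List.pyRange 0 (n + 1) 1).foldl
    (fun d j => d.insert (0, j) (PySem.List.pyGetD first_row j 0)) dp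
  let dp := (PySem.List.pyRange 1 (m + 1) 1).foldl
    (fun d i => (PySem.List.pyRange 1 (n + 1) 1).foldl
      (fun d j =>
        -- the defaultdict read dp[(i,j)] (missing key) yields 0 and materialises the key,
        -- which the assignment then overwrites in place: items-wise this is one insert
        if PySem.Str.pyGet? u (i - 1) == PySem.Str.pyGet? v (j - 1) then
          d.insert (i, j) (max (d.getD (i, j) 0) (d.getD (i - 1, j - 1) 0 + 1))
        else
          d.insert (i, j) (max (d.getD (i - 1, j) 0) (d.getD (i, j - 1) 0))) d) dp
  dp.items.map (fun p => (p.1.1, p.1.2, p.2))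

-- ===== PORT B =====
-- cell(i, j): returns the cached value if present (or a boundary entry), otherwise computes
-- it recursively and stores it; returns (value, updated dict) since the Python closure
-- mutates dp.  The driver only ever calls it with i, j ≥ 1, hence the Nat indices; the base
-- branch's defaultdict read dp[(i,j)] materialises the key with 0 when it is absent.
def pvCellB (u : String) (v : String) : Nat → Nat → PySem.Dict (Int × Int) Int → Int × PySem.Dict (Int × Int) Int
  | i, j, dp =>
    if i = 0 ∨ j = 0 ∨ dp.contains ((i : Int), (j : Int)) = true then
      (dp.getD ((i : Int), (j : Int)) 0,
       if dp.contains ((i : Int), (j : Int)) = true then dp else dp.insert ((i : Int), (j : Int)) 0)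
    else
      if PySem.Str.pyGet? u ((i : Int) - 1) == PySem.Str.pyGet? v ((j : Int) - 1) then
        -- val = max(dp[(i,j)], cell(i-1,j-1) + 1): the read of the absent key yields 0
        -- and materialises it; the later store overwrites it in place
        let d0 := dp.insert ((i : Int), (j : Int)) 0
        let r := pvCellB u v (i - 1) (j - 1) d0
        let val := max 0 (r.1 + 1)
        (val, r.2.insert ((i : Int), (j : Int)) val)
      else
        let r1 := pvCellB u v (i - 1) j dp
        let r2 := pvCellB u v i (j - 1) r1.2
        let val := max r1.1 r2.1
        (val, r2.2.insert ((i : Int), (j : Int)) val)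
  termination_by i j _ => i + j
  decreasing_by all_goals omega

def construct_lcs_grid_alt (u : String) (v : String) (first_col : List Int) (first_row : List Int) : List (Int × Int × Int) :=
  let m : Int := PySem.Str.len u
  let n : Int := PySem.Str.len v
  let dp : PySem.Dict (Int × Int) Int := PySem.Dict.empty
  let dp := (PySem.List.pyRange 0 (m + 1) 1).foldl
    (fun d i => d.insert (i, 0) (PySem.List.pyGetD first_col i 0)) dp
  let dp := (PySem.List.pyRange 0 (n + 1) 1).foldl
    (fun d j => d.insert (0, j) (PySem.List.pyGetD first_row j 0)) dp
  -- driver: for i in 1..m, for j in 1..n: cell(i, j); the range indices are ≥ 1, so .toNat is exact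
  let dp := (PySem.List.pyRange 1 (m + 1) 1).foldl
    (fun d i => (PySem.List.pyRange 1 (n + 1) 1).foldl
      (fun d j => (pvCellB u v i.toNat j.toNat d).2) d) dp
  dp.items.map (fun p => (p.1.1, p.1.2, p.2))

-- ===== PRECONDITION & SPEC =====
-- Pre_ excludes exactly the inputs where Python raises IndexError: A reads first_col[0..len(u)]
-- and first_row[0..len(v)], so both lists must be at least that long.
def Pre_construct_lcs_grid (u : String) (v : String) (first_col : List Int) (first_row : List Int) : Prop :=
  u.toList.length + 1 ≤ first_col.length ∧ v.toList.length + 1 ≤ first_row.length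
instance (u : String) (v : String) (first_col : List Int) (first_row : List Int) : Decidable (Pre_construct_lcs_grid u v first_col first_row) := by unfold Pre_construct_lcs_grid; infer_instance

def pvWitness_construct_lcs_grid : String × String × List Int × List Int := ("ab", "b", [0, 1, 2], [0, 0])

def Spec_construct_lcs_grid (u : String) (v : String) (first_col : List Int) (first_row : List Int) (out : List (Int × Int × Int)) : Prop := out = construct_lcs_grid_alt u v first_col first_row
instance (u : String) (v : String) (first_col : List Int) (first_row : List Int) (out : List (Int × Int × Int)) : Decidable (Spec_construct_lcs_grid u v first_col first_row out) := by unfold Spec_construct_lcs_grid; infer_instance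

-- ===== CLAIM (what is proved, stated in full; the proofs are below) =====
def Claim_equal_construct_lcs_grid : Prop := ∀ (u : String) (v : String) (first_col : List Int) (first_row : List Int), Dom_construct_lcs_grid u v first_col first_row → Pre_construct_lcs_grid u v first_col first_row → Spec_construct_lcs_grid u v first_col first_row (construct_lcs_grid u v first_col first_row)

-- ===== LEMMAS AND PROOFS =====

-- The mathematical grid value, defined by recursion on the cell.
def pvG (u : String) (v : String) (fc : List Int) (fr : List Int) : Nat → Nat → Int
  | 0, j => fr.getD j 0
  | i+1, 0 => fc.getD (i+1) 0
  | i+1, j+1 =>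
      if PySem.Str.pyGet? u (i : Int) == PySem.Str.pyGet? v (j : Int) then
        max (pvG u v fc fr i j + 1) 0
      else
        max (pvG u v fc fr i (j+1)) (pvG u v fc fr (i+1) j)
  termination_by i j => (i, j)

-- A's inner-loop body and the "pure" body that inserts the already-known grid value.
def pvABody (u : String) (v : String) (i : Int) (d : PySem.Dict (Int × Int) Int) (j : Int) : PySem.Dict (Int × Int) Int :=
  if PySem.Str.pyGet? u (i - 1) == PySem.Str.pyGet? v (j - 1) then
    d.insert (i, j) (max (d.getD (i, j) 0) (d.getD (i - 1, j - 1) 0 + 1))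
  else
    d.insert (i, j) (max (d.getD (i - 1, j) 0) (d.getD (i, j - 1) 0))

def pvPBody (u : String) (v : String) (fc : List Int) (fr : List Int) (i : Int) (d : PySem.Dict (Int × Int) Int) (j : Int) : PySem.Dict (Int × Int) Int :=
  d.insert (i, j) (pvG u v fc fr i.toNat j.toNat)

-- A fold of pure inserts over keys all different from k does not change the lookup at k.
theorem pvGetD_foldl_of_ne (L : List Int) (key : Int → Int × Int) (val : Int → Int)
    (k : Int × Int) (d0 : Int) (h : ∀ t ∈ L, key t ≠ k) :
    ∀ d : PySem.Dict (Int × Int) Int,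
      (L.foldl (fun d t => d.insert (key t) (val t)) d).getD k d0 = d.getD k d0 := by
  induction L with
  | nil => intro d; rfl
  | cons x t ih =>
    intro d
    simp only [List.foldl_cons]
    rw [ih (fun a ha => h a (List.mem_cons_of_mem _ ha))]
    rw [PySem.Dict.getD_insert, if_neg (fun he => h x List.mem_cons_self he.symm)]

theorem pvContains_foldl_of_ne (L : List Int) (key : Int → Int × Int) (val : Int → Int)
    (k : Int × Int) (h : ∀ t ∈ L, key t ≠ k) :
    ∀ d : PySem.Dict (Int × Int) Int,
      (L.foldl (fun d t => d.insert (key t) (val t)) d).contains k = d.contains k := by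
  induction L with
  | nil => intro d; rfl
  | cons x t ih =>
    intro d
    simp only [List.foldl_cons]
    rw [ih (fun a ha => h a (List.mem_cons_of_mem _ ha))]
    rw [PySem.Dict.contains_insert]
    have : (k == key x) = false := by
      simp only [beq_eq_false_iff_ne, ne_eq]
      exact fun he => h x List.mem_cons_self he.symm
    simp [this]

-- A fold of inserts never removes a key.
theorem pvContains_foldl_mono (L : List Int) (key : Int → Int × Int) (val : Int → Int)
    (k : Int × Int) :
    ∀ d : PySem.Dict (Int × Int) Int, d.contains k = true →
      (L.foldl (fun d t => d.insert (key t) (val t)) d).contains k = true := by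
  induction L with
  | nil => intro d h; exact h
  | cons x t ih =>
    intro d h
    simp only [List.foldl_cons]
    exact ih _ (by rw [PySem.Dict.contains_insert]; simp [h])

-- Lookup of a key inserted once in a pure fold over an Int range with injective keys.
theorem pvGetD_foldl_pure (key : Int → Int × Int) (val : Int → Int)
    (hinj : ∀ x y, key x = key y → x = y)
    (a b j : Int) (ha : a ≤ j) (hj : j < b) (d : PySem.Dict (Int × Int) Int) (d0 : Int) :
    ((PySem.List.pyRange a b 1).foldl (fun d t => d.insert (key t) (val t)) d).getD (key j) d0 = val j := by
  rw [PySem.List.pyRange_one_append a (j+1) b (by omega) (by omega), List.foldl_append]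
  rw [pvGetD_foldl_of_ne _ key val _ _
    (fun t ht hkt => by
      have hm := PySem.List.mem_pyRange_one.mp ht
      have := hinj _ _ hkt
      omega)]
  rw [PySem.List.pyRange_one_succ_right (by omega : a ≤ j), List.foldl_append]
  simp only [List.foldl_cons, List.foldl_nil]
  rw [PySem.Dict.getD_insert, if_pos rfl]

-- A key inserted somewhere in a pure fold over an Int range is present afterwards.
theorem pvContains_foldl_pure (key : Int → Int × Int) (val : Int → Int)
    (a b j : Int) (ha : a ≤ j) (hj : j < b) (d : PySem.Dict (Int × Int) Int) :
    ((PySem.List.pyRange a b 1).foldl (fun d t => d.insert (key t) (val t)) d).contains (key j) = true := by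
  rw [PySem.List.pyRange_one_append a (j+1) b (by omega) (by omega), List.foldl_append]
  apply pvContains_foldl_mono
  rw [PySem.List.pyRange_one_succ_right (by omega : a ≤ j), List.foldl_append]
  simp only [List.foldl_cons, List.foldl_nil]
  exact PySem.Dict.contains_insert_self _ _ _

-- Inserting an already-present key commutes with inserting a different key.
theorem pvInsert_comm (d : PySem.Dict (Int × Int) Int) (k k' : Int × Int) (w v : Int)
    (hc : d.contains k = true) (hne : k' ≠ k) :
    (d.insert k' v).insert k w = (d.insert k w).insert k' v := by
  have hck : (d.insert k' v).contains k = true := by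
    rw [PySem.Dict.contains_insert]; simp [hc]
  by_cases hck' : d.contains k' = true
  · have h1 : (d.insert k w).contains k' = true := by
      rw [PySem.Dict.contains_insert]; simp [hck']
    apply PySem.Dict.ext
    rw [PySem.Dict.items_insert_of_contains _ _ hck,
        PySem.Dict.items_insert_of_contains _ _ hck',
        PySem.Dict.items_insert_of_contains _ _ h1,
        PySem.Dict.items_insert_of_contains _ _ hc]
    simp only [List.map_map]
    apply List.map_congr_left
    intro p _
    simp only [Function.comp_apply]
    by_cases h1 : p.1 = k'
    · simp [h1, hne]
    · by_cases h2 : p.1 = k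
      · simp [h2, Ne.symm hne]
      · simp [h1, h2]
  · have hck'f : d.contains k' = false := by
      cases h : d.contains k' with
      | false => rfl
      | true => exact absurd h hck'
    have h1 : (d.insert k w).contains k' = false := by
      rw [PySem.Dict.contains_insert, hck'f]
      simp [hne]
    apply PySem.Dict.ext
    rw [PySem.Dict.items_insert_of_contains _ _ hck,
        PySem.Dict.items_insert_of_not_contains _ _ hck'f,
        PySem.Dict.items_insert_of_not_contains _ _ h1,
        PySem.Dict.items_insert_of_contains _ _ hc]
    simp [List.map_append, hne]

-- Pushing an insert of an already-present key through a pure insert fold over other keys.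
theorem pvFoldl_insert_comm (L : List Int) (key : Int → Int × Int) (val : Int → Int)
    (k : Int × Int) (w : Int) (h : ∀ t ∈ L, key t ≠ k) :
    ∀ d : PySem.Dict (Int × Int) Int, d.contains k = true →
      (L.foldl (fun d t => d.insert (key t) (val t)) d).insert k w
        = L.foldl (fun d t => d.insert (key t) (val t)) (d.insert k w) := by
  induction L with
  | nil => intro d _; rfl
  | cons x t ih =>
    intro d hc
    simp only [List.foldl_cons]
    rw [ih (fun a ha => h a (List.mem_cons_of_mem _ ha)) _
        (by rw [PySem.Dict.contains_insert]; simp [hc])]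
    rw [pvInsert_comm d k (key x) w (val x) hc (h x List.mem_cons_self)]

-- A's processing of one row equals the pure insertion of the grid values of that row.
theorem pvRowA (u : String) (v : String) (fc : List Int) (fr : List Int) (i : Nat) (hi : 1 ≤ i) :
    ∀ (k j0 : Nat), 1 ≤ j0 → j0 + k = v.toList.length + 1 →
    ∀ d : PySem.Dict (Int × Int) Int,
    (∀ j : Nat, j ≤ v.toList.length → d.getD ((i : Int) - 1, (j : Int)) 0 = pvG u v fc fr (i - 1) j) →
    d.getD ((i : Int), (j0 : Int) - 1) 0 = pvG u v fc fr i (j0 - 1) →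
    (∀ j : Nat, j0 ≤ j → d.contains ((i : Int), (j : Int)) = false) →
    (PySem.List.pyRange (j0 : Int) ((v.toList.length : Int) + 1) 1).foldl (pvABody u v (i : Int)) d
      = (PySem.List.pyRange (j0 : Int) ((v.toList.length : Int) + 1) 1).foldl (pvPBody u v fc fr (i : Int)) d := by
  intro k
  induction k with
  | zero =>
    intro j0 hj0 hsum d _ _ _
    rw [PySem.List.pyRange_one_eq_nil (by omega)]
    rfl
  | succ k ih =>
    intro j0 hj0 hsum d h1 h2 h3
    rw [PySem.List.pyRange_one_cons (by omega : (j0 : Int) < (v.toList.length : Int) + 1)]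
    simp only [List.foldl_cons]
    obtain ⟨i', rfl⟩ : ∃ i', i = i' + 1 := ⟨i - 1, by omega⟩
    obtain ⟨j', rfl⟩ : ∃ j', j0 = j' + 1 := ⟨j0 - 1, by omega⟩
    have e1 : ((i' + 1 : Nat) : Int) - 1 = (i' : Int) := by push_cast; ring
    have e2 : ((j' + 1 : Nat) : Int) - 1 = (j' : Int) := by push_cast; ring
    have hstep : pvABody u v ((i' + 1 : Nat) : Int) d ((j' + 1 : Nat) : Int)
        = pvPBody u v fc fr ((i' + 1 : Nat) : Int) d ((j' + 1 : Nat) : Int) := by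
      unfold pvABody pvPBody
      have e3 : ((i' + 1 : Nat) : Int).toNat = i' + 1 := by omega
      have e4 : ((j' + 1 : Nat) : Int).toNat = j' + 1 := by omega
      rw [e1, e2, e3, e4]
      have hd0 : d.getD (((i' + 1 : Nat) : Int), ((j' + 1 : Nat) : Int)) 0 = 0 :=
        PySem.Dict.getD_of_not_contains _ _ (h3 (j' + 1) le_rfl)
      have hdiag := h1 j' (by omega)
      have hup := h1 (j' + 1) (by omega)
      have hleft := h2
      rw [e1] at hdiag hup
      rw [e2] at hleft
      simp only [Nat.add_sub_cancel] at hdiag hup hleft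
      rw [pvG]
      by_cases hcond : (PySem.Str.pyGet? u (i' : Int) == PySem.Str.pyGet? v (j' : Int)) = true
      · rw [if_pos hcond, if_pos hcond, hd0, hdiag, max_comm]
      · rw [if_neg hcond, if_neg hcond, hup, hleft]
    rw [hstep]
    have ecast : ((j' + 1 : Nat) : Int) + 1 = (((j' + 1 + 1 : Nat)) : Int) := by push_cast; ring
    rw [ecast]
    apply ih (j' + 1 + 1) (by omega) (by omega)
    · intro j hj
      unfold pvPBody
      rw [PySem.Dict.getD_insert, if_neg (by
        intro he
        rw [Prod.mk.injEq] at he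
        omega)]
      have := h1 j hj
      rw [e1] at this ⊢
      simpa using this
    · unfold pvPBody
      have e5 : ((j' + 1 + 1 : Nat) : Int) - 1 = ((j' + 1 : Nat) : Int) := by push_cast; ring
      rw [e5, PySem.Dict.getD_insert, if_pos rfl]
      have e4 : ((j' + 1 : Nat) : Int).toNat = j' + 1 := by omega
      rw [e4]
      simp
    · intro j hj
      unfold pvPBody
      rw [PySem.Dict.contains_insert]
      have : ((((i' + 1 : Nat) : Int), (j : Int)) == (((i' + 1 : Nat) : Int), ((j' + 1 : Nat) : Int))) = false := by
        simp only [beq_eq_false_iff_ne, ne_eq, Prod.mk.injEq]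
        omega
      rw [this, h3 j (by omega)]
      rfl

-- A's whole fill phase equals the pure fill, given a correctly initialised dict.
theorem pvFillA_eq (u : String) (v : String) (fc : List Int) (fr : List Int) :
    ∀ (k i0 : Nat), 1 ≤ i0 → i0 + k = u.toList.length + 1 →
    ∀ d : PySem.Dict (Int × Int) Int,
    (∀ j : Nat, j ≤ v.toList.length → d.getD ((i0 : Int) - 1, (j : Int)) 0 = pvG u v fc fr (i0 - 1) j) →
    (∀ a : Nat, i0 ≤ a → a ≤ u.toList.length → d.getD ((a : Int), 0) 0 = pvG u v fc fr a 0) →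
    (∀ a b : Nat, i0 ≤ a → 1 ≤ b → d.contains ((a : Int), (b : Int)) = false) →
    (PySem.List.pyRange (i0 : Int) ((u.toList.length : Int) + 1) 1).foldl
        (fun d i => (PySem.List.pyRange 1 ((v.toList.length : Int) + 1) 1).foldl (pvABody u v i) d) d
      = (PySem.List.pyRange (i0 : Int) ((u.toList.length : Int) + 1) 1).foldl
        (fun d i => (PySem.List.pyRange 1 ((v.toList.length : Int) + 1) 1).foldl (pvPBody u v fc fr i) d) d := by
  intro k
  induction k with
  | zero =>
    intro i0 hi0 hsum d _ _ _
    rw [show PySem.List.pyRange (i0 : Int) ((u.toList.length : Int) + 1) 1 = []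
      from PySem.List.pyRange_one_eq_nil (by omega)]
    rfl
  | succ k ih =>
    intro i0 hi0 hsum d h1 h2 h3
    rw [PySem.List.pyRange_one_cons (by omega : (i0 : Int) < (u.toList.length : Int) + 1)]
    simp only [List.foldl_cons]
    have hone : ((1 : Nat) : Int) = (1 : Int) := by norm_num
    have hh2 : d.getD ((i0 : Int), ((1 : Nat) : Int) - 1) 0 = pvG u v fc fr i0 (1 - 1) := by
      rw [hone]
      norm_num
      simpa using h2 i0 le_rfl (by omega)
    have hrow := pvRowA u v fc fr i0 hi0 v.toList.length 1 le_rfl (by omega) d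
      h1 hh2 (fun j hj => h3 i0 j le_rfl hj)
    rw [hone] at hrow
    rw [hrow]
    -- pure-fold shape of the row body
    have hshape : pvPBody u v fc fr (i0 : Int)
        = fun d t => d.insert (((i0 : Int)), t) (pvG u v fc fr ((i0 : Int)).toNat t.toNat) := rfl
    have hton : ((i0 : Int)).toNat = i0 := by omega
    set d' := (PySem.List.pyRange 1 ((v.toList.length : Int) + 1) 1).foldl (pvPBody u v fc fr (i0 : Int)) d with hd'
    have hd'get : ∀ j : Nat, 1 ≤ j → j ≤ v.toList.length →
        d'.getD ((i0 : Int), (j : Int)) 0 = pvG u v fc fr i0 j := by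
      intro j hj1 hj2
      rw [hd', hshape]
      have := pvGetD_foldl_pure (fun t => ((i0 : Int), t))
        (fun t => pvG u v fc fr ((i0 : Int)).toNat t.toNat)
        (fun x y hxy => by simpa using (Prod.mk.injEq _ _ _ _ ▸ hxy).2)
        1 ((v.toList.length : Int) + 1) (j : Int) (by omega) (by omega) d 0
      simpa [hton] using this
    have hd'of_ne : ∀ (kk : Int × Int), (∀ t : Int, 1 ≤ t → t < (v.toList.length : Int) + 1 → ((i0 : Int), t) ≠ kk) →
        d'.getD kk 0 = d.getD kk 0 := by
      intro kk hk
      rw [hd', hshape]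
      exact pvGetD_foldl_of_ne _ (fun t => ((i0 : Int), t)) _ kk 0
        (fun t ht => hk t (PySem.List.mem_pyRange_one.mp ht).1 (PySem.List.mem_pyRange_one.mp ht).2) d
    have hd'contains : ∀ (kk : Int × Int), (∀ t : Int, 1 ≤ t → t < (v.toList.length : Int) + 1 → ((i0 : Int), t) ≠ kk) →
        d'.contains kk = d.contains kk := by
      intro kk hk
      rw [hd', hshape]
      exact pvContains_foldl_of_ne _ (fun t => ((i0 : Int), t)) _ kk
        (fun t ht => hk t (PySem.List.mem_pyRange_one.mp ht).1 (PySem.List.mem_pyRange_one.mp ht).2) d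
    have ecast : ((i0 : Int)) + 1 = (((i0 + 1 : Nat)) : Int) := by push_cast; ring
    rw [ecast]
    apply ih (i0 + 1) (by omega) (by omega)
    · intro j hj
      have e1 : ((i0 + 1 : Nat) : Int) - 1 = (i0 : Int) := by push_cast; ring
      rw [e1]
      simp only [Nat.add_sub_cancel]
      rcases Nat.eq_zero_or_pos j with hj0 | hj0
      · subst hj0
        rw [hd'of_ne ((i0 : Int), ((0 : Nat) : Int)) (fun t ht _ he => by
          rw [Prod.mk.injEq] at he
          omega)]
        simpa using h2 i0 le_rfl (by omega)
      · exact hd'get j hj0 hj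
    · intro a ha1 ha2
      rw [hd'of_ne ((a : Int), 0) (fun t ht _ he => by
        rw [Prod.mk.injEq] at he
        omega)]
      exact h2 a (by omega) ha2
    · intro a b ha hb
      rw [hd'contains ((a : Int), (b : Int)) (fun t ht _ he => by
        rw [Prod.mk.injEq] at he
        omega)]
      exact h3 a b (by omega) hb

-- A's and B's (identical) initialisation phases, in a normal form with (0,0) inserted once.
def pvInitB (u : String) (v : String) (fc : List Int) (fr : List Int) : PySem.Dict (Int × Int) Int :=
  (PySem.List.pyRange 1 ((v.toList.length : Int) + 1) 1).foldl
    (fun d j => d.insert (0, j) (PySem.List.pyGetD fr j 0))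
    ((PySem.List.pyRange 1 ((u.toList.length : Int) + 1) 1).foldl
      (fun d i => d.insert (i, 0) (PySem.List.pyGetD fc i 0))
      (PySem.Dict.empty.insert (0, 0) (PySem.List.pyGetD fr 0 0)))

theorem pvInitA_eq (u : String) (v : String) (fc : List Int) (fr : List Int) :
    (PySem.List.pyRange 0 ((v.toList.length : Int) + 1) 1).foldl
      (fun d j => d.insert (0, j) (PySem.List.pyGetD fr j 0))
      ((PySem.List.pyRange 0 ((u.toList.length : Int) + 1) 1).foldl
        (fun d i => d.insert (i, 0) (PySem.List.pyGetD fc i 0)) PySem.Dict.empty)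
    = pvInitB u v fc fr := by
  rw [PySem.List.pyRange_one_cons (by omega : (0 : Int) < (u.toList.length : Int) + 1)]
  rw [PySem.List.pyRange_one_cons (by omega : (0 : Int) < (v.toList.length : Int) + 1)]
  simp only [List.foldl_cons, zero_add]
  rw [pvFoldl_insert_comm _ (fun t => (t, (0 : Int))) (fun t => PySem.List.pyGetD fc t 0)
      ((0 : Int), (0 : Int)) (PySem.List.pyGetD fr 0 0)
      (fun t ht he => by
        have := PySem.List.mem_pyRange_one.mp ht
        rw [Prod.mk.injEq] at he
        omega)
      _ (PySem.Dict.contains_insert_self _ _ _)]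
  rw [PySem.Dict.insert_insert_self]
  rfl

-- Lookups in the initial dict.
theorem pvInitB_getD_row0 (u : String) (v : String) (fc : List Int) (fr : List Int)
    (j : Nat) (hj : j ≤ v.toList.length) :
    (pvInitB u v fc fr).getD ((0 : Int), (j : Int)) 0 = pvG u v fc fr 0 j := by
  unfold pvInitB
  rcases Nat.eq_zero_or_pos j with hj0 | hj0
  · subst hj0
    rw [pvGetD_foldl_of_ne _ (fun t => ((0 : Int), t)) _ _ _
      (fun t ht he => by
        have := PySem.List.mem_pyRange_one.mp ht
        rw [Prod.mk.injEq] at he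
        omega)]
    rw [pvGetD_foldl_of_ne _ (fun t => (t, (0 : Int))) _ _ _
      (fun t ht he => by
        have := PySem.List.mem_pyRange_one.mp ht
        rw [Prod.mk.injEq] at he
        omega)]
    rw [PySem.Dict.getD_insert]
    simp [PySem.List.pyGetD_zero, pvG]
  · have := pvGetD_foldl_pure (fun t => ((0 : Int), t)) (fun t => PySem.List.pyGetD fr t 0)
      (fun x y hxy => by simpa using (Prod.mk.injEq _ _ _ _ ▸ hxy).2)
      1 ((v.toList.length : Int) + 1) (j : Int) (by omega) (by omega)
      ((PySem.List.pyRange 1 ((u.toList.length : Int) + 1) 1).foldl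
        (fun d i => d.insert (i, 0) (PySem.List.pyGetD fc i 0))
        (PySem.Dict.empty.insert (0, 0) (PySem.List.pyGetD fr 0 0))) 0
    rw [this]
    rw [PySem.List.pyGetD_natCast]
    obtain ⟨j', rfl⟩ : ∃ j', j = j' + 1 := ⟨j - 1, by omega⟩
    rw [pvG]

theorem pvInitB_getD_col (u : String) (v : String) (fc : List Int) (fr : List Int)
    (a : Nat) (ha1 : 1 ≤ a) (ha2 : a ≤ u.toList.length) :
    (pvInitB u v fc fr).getD ((a : Int), 0) 0 = pvG u v fc fr a 0 := by
  unfold pvInitB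
  rw [pvGetD_foldl_of_ne _ (fun t => ((0 : Int), t)) _ _ _
    (fun t ht he => by
      rw [Prod.mk.injEq] at he
      omega)]
  have := pvGetD_foldl_pure (fun t => (t, (0 : Int))) (fun t => PySem.List.pyGetD fc t 0)
    (fun x y hxy => by simpa using (Prod.mk.injEq _ _ _ _ ▸ hxy).1)
    1 ((u.toList.length : Int) + 1) (a : Int) (by omega) (by omega)
    (PySem.Dict.empty.insert (0, 0) (PySem.List.pyGetD fr 0 0)) 0
  rw [this]
  rw [PySem.List.pyGetD_natCast]
  obtain ⟨a', rfl⟩ : ∃ a', a = a' + 1 := ⟨a - 1, by omega⟩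
  rw [pvG]

theorem pvInitB_contains (u : String) (v : String) (fc : List Int) (fr : List Int)
    (a b : Nat) (ha : 1 ≤ a) (hb : 1 ≤ b) :
    (pvInitB u v fc fr).contains ((a : Int), (b : Int)) = false := by
  unfold pvInitB
  rw [pvContains_foldl_of_ne _ (fun t => ((0 : Int), t)) _ _
    (fun t ht he => by
      rw [Prod.mk.injEq] at he
      omega)]
  rw [pvContains_foldl_of_ne _ (fun t => (t, (0 : Int))) _ _
    (fun t ht he => by
      rw [Prod.mk.injEq] at he
      omega)]
  rw [PySem.Dict.contains_insert]
  have h1 : ((((a : Nat) : Int), ((b : Nat) : Int)) == ((0 : Int), (0 : Int))) = false := by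
    simp only [beq_eq_false_iff_ne, ne_eq, Prod.mk.injEq]
    omega
  rw [h1]
  rfl

-- Boundary keys are present in the initial dict.
theorem pvInitB_contains_row0 (u : String) (v : String) (fc : List Int) (fr : List Int)
    (j : Nat) (hj : j ≤ v.toList.length) :
    (pvInitB u v fc fr).contains ((0 : Int), (j : Int)) = true := by
  unfold pvInitB
  rcases Nat.eq_zero_or_pos j with hj0 | hj0
  · subst hj0
    apply pvContains_foldl_mono
    apply pvContains_foldl_mono
    simp [PySem.Dict.contains_insert_self]
  · exact pvContains_foldl_pure (fun t => ((0 : Int), t)) _ 1 _ (j : Int) (by omega) (by omega) _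

theorem pvInitB_contains_col (u : String) (v : String) (fc : List Int) (fr : List Int)
    (a : Nat) (ha : a ≤ u.toList.length) :
    (pvInitB u v fc fr).contains ((a : Int), 0) = true := by
  unfold pvInitB
  apply pvContains_foldl_mono
  rcases Nat.eq_zero_or_pos a with ha0 | ha0
  · subst ha0
    apply pvContains_foldl_mono
    simp [PySem.Dict.contains_insert_self]
  · exact pvContains_foldl_pure (fun t => (t, (0 : Int))) _ 1 _ (a : Int) (by omega) (by omega) _

-- B-side: one memoised-recursion call on a state where the three neighbour cells are cached
-- and the cell itself is not reduces to a single insert of the grid value.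
theorem pvCellB_step (u : String) (v : String) (fc : List Int) (fr : List Int) (i' j' : Nat)
    (d : PySem.Dict (Int × Int) Int)
    (hfree : d.contains (((i' + 1 : Nat) : Int), ((j' + 1 : Nat) : Int)) = false)
    (hcd : d.contains (((i' : Nat) : Int), ((j' : Nat) : Int)) = true)
    (hgd : d.getD (((i' : Nat) : Int), ((j' : Nat) : Int)) 0 = pvG u v fc fr i' j')
    (hcu : d.contains (((i' : Nat) : Int), ((j' + 1 : Nat) : Int)) = true)
    (hgu : d.getD (((i' : Nat) : Int), ((j' + 1 : Nat) : Int)) 0 = pvG u v fc fr i' (j' + 1))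
    (hcl : d.contains (((i' + 1 : Nat) : Int), ((j' : Nat) : Int)) = true)
    (hgl : d.getD (((i' + 1 : Nat) : Int), ((j' : Nat) : Int)) 0 = pvG u v fc fr (i' + 1) j') :
    pvCellB u v (i' + 1) (j' + 1) d
      = (pvG u v fc fr (i' + 1) (j' + 1),
         d.insert (((i' + 1 : Nat) : Int), ((j' + 1 : Nat) : Int)) (pvG u v fc fr (i' + 1) (j' + 1))) := by
  rw [pvCellB]
  rw [if_neg (by
    rintro (h | h | h)
    · omega
    · omega
    · rw [hfree] at h; cases h)]
  have e1 : (((i' + 1 : Nat) : Int)) - 1 = ((i' : Nat) : Int) := by push_cast; ring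
  have e2 : (((j' + 1 : Nat) : Int)) - 1 = ((j' : Nat) : Int) := by push_cast; ring
  rw [e1, e2]
  have hne : ∀ a b : Nat, ¬(a = i' + 1 ∧ b = j' + 1) →
      ((((a : Nat) : Int), ((b : Nat) : Int)) = (((i' + 1 : Nat) : Int), ((j' + 1 : Nat) : Int))) → False := by
    intro a b hab he
    rw [Prod.mk.injEq] at he
    omega
  by_cases hcond : (PySem.Str.pyGet? u ((i' : Nat) : Int) == PySem.Str.pyGet? v ((j' : Nat) : Int)) = true
  · rw [if_pos hcond]
    simp only [Nat.add_sub_cancel]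
    have hc0 : (d.insert (((i' + 1 : Nat) : Int), ((j' + 1 : Nat) : Int)) 0).contains
        (((i' : Nat) : Int), ((j' : Nat) : Int)) = true := by
      rw [PySem.Dict.contains_insert]
      simp only [hcd, Bool.or_true]
    rw [pvCellB]
    rw [if_pos (Or.inr (Or.inr hc0))]
    simp only [hc0, if_pos]
    rw [PySem.Dict.getD_insert,
        if_neg (fun he => absurd he (fun he => hne i' j' (by omega) he))]
    rw [hgd, PySem.Dict.insert_insert_self]
    rw [pvG, if_pos hcond, max_comm]
  · rw [if_neg hcond]
    simp only [Nat.add_sub_cancel]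
    -- r1 = cell(i', j'+1) on d: cached
    rw [pvCellB]
    rw [if_pos (Or.inr (Or.inr hcu))]
    simp only [hcu, if_pos]
    -- r2 = cell(i'+1, j') on d: cached (or boundary j' = 0, also cached)
    rw [pvCellB]
    rw [if_pos (Or.inr (Or.inr hcl))]
    simp only [hcl, if_pos]
    rw [hgu, hgl]
    rw [pvG, if_neg hcond]

-- B's driver processing of one row equals the pure insertion of the grid values of that row.
theorem pvRowB (u : String) (v : String) (fc : List Int) (fr : List Int) (i' : Nat) :
    ∀ (k j0 : Nat), 1 ≤ j0 → j0 + k = v.toList.length + 1 →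
    ∀ d : PySem.Dict (Int × Int) Int,
    (∀ j : Nat, j ≤ v.toList.length → d.contains ((i' : Int), (j : Int)) = true) →
    (∀ j : Nat, j ≤ v.toList.length → d.getD ((i' : Int), (j : Int)) 0 = pvG u v fc fr i' j) →
    d.contains (((i' + 1 : Nat) : Int), ((j0 - 1 : Nat) : Int)) = true →
    d.getD (((i' + 1 : Nat) : Int), ((j0 - 1 : Nat) : Int)) 0 = pvG u v fc fr (i' + 1) (j0 - 1) →
    (∀ j : Nat, j0 ≤ j → d.contains (((i' + 1 : Nat) : Int), (j : Int)) = false) →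
    (PySem.List.pyRange (j0 : Int) ((v.toList.length : Int) + 1) 1).foldl
        (fun d j => (pvCellB u v (i' + 1) j.toNat d).2) d
      = (PySem.List.pyRange (j0 : Int) ((v.toList.length : Int) + 1) 1).foldl
        (pvPBody u v fc fr ((i' + 1 : Nat) : Int)) d := by
  intro k
  induction k with
  | zero =>
    intro j0 hj0 hsum d _ _ _ _ _
    rw [PySem.List.pyRange_one_eq_nil (by omega)]
    rfl
  | succ k ih =>
    intro j0 hj0 hsum d hc1 hg1 hc2 hg2 h3
    rw [PySem.List.pyRange_one_cons (by omega : (j0 : Int) < (v.toList.length : Int) + 1)]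
    simp only [List.foldl_cons]
    obtain ⟨j', rfl⟩ : ∃ j', j0 = j' + 1 := ⟨j0 - 1, by omega⟩
    simp only [Nat.add_sub_cancel] at hc2 hg2
    have eton : (((j' + 1 : Nat) : Int)).toNat = j' + 1 := by omega
    have hstep : (pvCellB u v (i' + 1) (((j' + 1 : Nat) : Int)).toNat d).2
        = pvPBody u v fc fr ((i' + 1 : Nat) : Int) d ((j' + 1 : Nat) : Int) := by
      rw [eton]
      rw [pvCellB_step u v fc fr i' j' d (h3 (j' + 1) le_rfl)
        (hc1 j' (by omega)) (hg1 j' (by omega))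
        (hc1 (j' + 1) (by omega)) (hg1 (j' + 1) (by omega))
        hc2 hg2]
      unfold pvPBody
      have e3 : ((i' + 1 : Nat) : Int).toNat = i' + 1 := by omega
      rw [e3, eton]
    rw [hstep]
    have ecast : ((j' + 1 : Nat) : Int) + 1 = (((j' + 1 + 1 : Nat)) : Int) := by push_cast; ring
    rw [ecast]
    apply ih (j' + 1 + 1) (by omega) (by omega)
    · intro j hj
      unfold pvPBody
      rw [PySem.Dict.contains_insert]
      have : ((((i' : Nat) : Int), (j : Int)) == (((i' + 1 : Nat) : Int), ((j' + 1 : Nat) : Int))) = false := by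
        simp only [beq_eq_false_iff_ne, ne_eq, Prod.mk.injEq]
        omega
      rw [this]
      simp [hc1 j hj]
    · intro j hj
      unfold pvPBody
      rw [PySem.Dict.getD_insert, if_neg (by
        intro he
        rw [Prod.mk.injEq] at he
        omega)]
      exact hg1 j hj
    · unfold pvPBody
      simp only [Nat.add_sub_cancel]
      exact PySem.Dict.contains_insert_self _ _ _
    · unfold pvPBody
      simp only [Nat.add_sub_cancel]
      rw [PySem.Dict.getD_insert, if_pos rfl]
      have e3 : ((i' + 1 : Nat) : Int).toNat = i' + 1 := by omega
      rw [e3, eton]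
    · intro j hj
      unfold pvPBody
      rw [PySem.Dict.contains_insert]
      have : ((((i' + 1 : Nat) : Int), (j : Int)) == (((i' + 1 : Nat) : Int), ((j' + 1 : Nat) : Int))) = false := by
        simp only [beq_eq_false_iff_ne, ne_eq, Prod.mk.injEq]
        omega
      rw [this, h3 j (by omega)]
      rfl

-- B's whole driver phase equals the pure fill, given a correctly initialised dict.
theorem pvFillB_eq (u : String) (v : String) (fc : List Int) (fr : List Int) :
    ∀ (k i0 : Nat), 1 ≤ i0 → i0 + k = u.toList.length + 1 →
    ∀ d : PySem.Dict (Int × Int) Int,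
    (∀ j : Nat, j ≤ v.toList.length → d.contains ((i0 : Int) - 1, (j : Int)) = true) →
    (∀ j : Nat, j ≤ v.toList.length → d.getD ((i0 : Int) - 1, (j : Int)) 0 = pvG u v fc fr (i0 - 1) j) →
    (∀ a : Nat, i0 ≤ a → a ≤ u.toList.length → d.contains ((a : Int), 0) = true) →
    (∀ a : Nat, i0 ≤ a → a ≤ u.toList.length → d.getD ((a : Int), 0) 0 = pvG u v fc fr a 0) →
    (∀ a b : Nat, i0 ≤ a → 1 ≤ b → d.contains ((a : Int), (b : Int)) = false) →
    (PySem.List.pyRange (i0 : Int) ((u.toList.length : Int) + 1) 1).foldl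
        (fun d i => (PySem.List.pyRange 1 ((v.toList.length : Int) + 1) 1).foldl
          (fun d j => (pvCellB u v i.toNat j.toNat d).2) d) d
      = (PySem.List.pyRange (i0 : Int) ((u.toList.length : Int) + 1) 1).foldl
        (fun d i => (PySem.List.pyRange 1 ((v.toList.length : Int) + 1) 1).foldl (pvPBody u v fc fr i) d) d := by
  intro k
  induction k with
  | zero =>
    intro i0 hi0 hsum d _ _ _ _ _
    rw [show PySem.List.pyRange (i0 : Int) ((u.toList.length : Int) + 1) 1 = []
      from PySem.List.pyRange_one_eq_nil (by omega)]
    rfl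
  | succ k ih =>
    intro i0 hi0 hsum d hc1 hg1 hc2 hg2 h3
    rw [PySem.List.pyRange_one_cons (by omega : (i0 : Int) < (u.toList.length : Int) + 1)]
    simp only [List.foldl_cons]
    obtain ⟨i', rfl⟩ : ∃ i', i0 = i' + 1 := ⟨i0 - 1, by omega⟩
    have e1 : (((i' + 1 : Nat) : Int)) - 1 = ((i' : Nat) : Int) := by push_cast; ring
    rw [e1] at hc1 hg1
    simp only [Nat.add_sub_cancel] at hg1
    have eton : (((i' + 1 : Nat) : Int)).toNat = i' + 1 := by omega
    have hbody : (fun (d : PySem.Dict (Int × Int) Int) (j : Int) =>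
          (pvCellB u v (((i' + 1 : Nat) : Int)).toNat j.toNat d).2)
        = fun (d : PySem.Dict (Int × Int) Int) (j : Int) => (pvCellB u v (i' + 1) j.toNat d).2 := by
      rw [eton]
    rw [hbody]
    have hone : ((1 : Nat) : Int) = (1 : Int) := by norm_num
    have hc2' : d.contains (((i' + 1 : Nat) : Int), ((1 - 1 : Nat) : Int)) = true := by
      simpa using hc2 (i' + 1) le_rfl (by omega)
    have hg2' : d.getD (((i' + 1 : Nat) : Int), ((1 - 1 : Nat) : Int)) 0 = pvG u v fc fr (i' + 1) (1 - 1) := by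
      simpa using hg2 (i' + 1) le_rfl (by omega)
    have hrow := pvRowB u v fc fr i' v.toList.length 1 le_rfl (by omega) d
      hc1 hg1 hc2' hg2' (fun j hj => h3 (i' + 1) j le_rfl hj)
    rw [hone] at hrow
    rw [hrow]
    -- pure-fold shape of the row body
    have hshape : pvPBody u v fc fr ((i' + 1 : Nat) : Int)
        = fun d t => d.insert ((((i' + 1 : Nat) : Int)), t) (pvG u v fc fr (((i' + 1 : Nat) : Int)).toNat t.toNat) := rfl
    set d' := (PySem.List.pyRange 1 ((v.toList.length : Int) + 1) 1).foldl (pvPBody u v fc fr ((i' + 1 : Nat) : Int)) d with hd'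
    have hd'get : ∀ j : Nat, 1 ≤ j → j ≤ v.toList.length →
        d'.getD (((i' + 1 : Nat) : Int), (j : Int)) 0 = pvG u v fc fr (i' + 1) j := by
      intro j hj1 hj2
      rw [hd', hshape]
      have := pvGetD_foldl_pure (fun t => (((i' + 1 : Nat) : Int), t))
        (fun t => pvG u v fc fr (((i' + 1 : Nat) : Int)).toNat t.toNat)
        (fun x y hxy => by simpa using (Prod.mk.injEq _ _ _ _ ▸ hxy).2)
        1 ((v.toList.length : Int) + 1) (j : Int) (by omega) (by omega) d 0
      simpa [eton] using this
    have hd'cont : ∀ j : Nat, 1 ≤ j → j ≤ v.toList.length →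
        d'.contains (((i' + 1 : Nat) : Int), (j : Int)) = true := by
      intro j hj1 hj2
      rw [hd', hshape]
      exact pvContains_foldl_pure (fun t => (((i' + 1 : Nat) : Int), t)) _
        1 ((v.toList.length : Int) + 1) (j : Int) (by omega) (by omega) d
    have hd'of_ne : ∀ (kk : Int × Int), (∀ t : Int, 1 ≤ t → t < (v.toList.length : Int) + 1 → (((i' + 1 : Nat) : Int), t) ≠ kk) →
        d'.getD kk 0 = d.getD kk 0 := by
      intro kk hk
      rw [hd', hshape]
      exact pvGetD_foldl_of_ne _ (fun t => (((i' + 1 : Nat) : Int), t)) _ kk 0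
        (fun t ht => hk t (PySem.List.mem_pyRange_one.mp ht).1 (PySem.List.mem_pyRange_one.mp ht).2) d
    have hd'contains : ∀ (kk : Int × Int), (∀ t : Int, 1 ≤ t → t < (v.toList.length : Int) + 1 → (((i' + 1 : Nat) : Int), t) ≠ kk) →
        d'.contains kk = d.contains kk := by
      intro kk hk
      rw [hd', hshape]
      exact pvContains_foldl_of_ne _ (fun t => (((i' + 1 : Nat) : Int), t)) _ kk
        (fun t ht => hk t (PySem.List.mem_pyRange_one.mp ht).1 (PySem.List.mem_pyRange_one.mp ht).2) d
    have ecast : (((i' + 1 : Nat) : Int)) + 1 = (((i' + 1 + 1 : Nat)) : Int) := by push_cast; ring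
    rw [ecast]
    apply ih (i' + 1 + 1) (by omega) (by omega)
    · intro j hj
      have e2 : ((i' + 1 + 1 : Nat) : Int) - 1 = ((i' + 1 : Nat) : Int) := by push_cast; ring
      rw [e2]
      rcases Nat.eq_zero_or_pos j with hj0 | hj0
      · subst hj0
        rw [hd'contains (((i' + 1 : Nat) : Int), ((0 : Nat) : Int)) (fun t ht _ he => by
          rw [Prod.mk.injEq] at he
          omega)]
        simpa using hc2 (i' + 1) le_rfl (by omega)
      · exact hd'cont j hj0 hj
    · intro j hj
      have e2 : ((i' + 1 + 1 : Nat) : Int) - 1 = ((i' + 1 : Nat) : Int) := by push_cast; ring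
      rw [e2]
      simp only [Nat.add_sub_cancel]
      rcases Nat.eq_zero_or_pos j with hj0 | hj0
      · subst hj0
        rw [hd'of_ne (((i' + 1 : Nat) : Int), ((0 : Nat) : Int)) (fun t ht _ he => by
          rw [Prod.mk.injEq] at he
          omega)]
        simpa using hg2 (i' + 1) le_rfl (by omega)
      · exact hd'get j hj0 hj
    · intro a ha1 ha2
      rw [hd'contains ((a : Int), 0) (fun t ht _ he => by
        rw [Prod.mk.injEq] at he
        omega)]
      exact hc2 a (by omega) ha2
    · intro a ha1 ha2
      rw [hd'of_ne ((a : Int), 0) (fun t ht _ he => by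
        rw [Prod.mk.injEq] at he
        omega)]
      exact hg2 a (by omega) ha2
    · intro a b ha hb
      rw [hd'contains ((a : Int), (b : Int)) (fun t ht _ he => by
        rw [Prod.mk.injEq] at he
        omega)]
      exact h3 a b (by omega) hb

-- Main equality of the two final dicts (stated with the proof-side names; each side is
-- definitionally equal to the corresponding port).
theorem pvMain (u : String) (v : String) (fc : List Int) (fr : List Int) :
    List.map (fun p => (p.1.1, p.1.2, p.2))
      (List.foldl
        (fun d i => List.foldl (pvABody u v i) d (PySem.List.pyRange 1 ((v.toList.length : Int) + 1)))
        (List.foldl (fun d j => d.insert (0, j) (PySem.List.pyGetD fr j 0))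
          (List.foldl (fun d i => d.insert (i, 0) (PySem.List.pyGetD fc i 0)) PySem.Dict.empty
            (PySem.List.pyRange 0 ((u.toList.length : Int) + 1)))
          (PySem.List.pyRange 0 ((v.toList.length : Int) + 1)))
        (PySem.List.pyRange 1 ((u.toList.length : Int) + 1))).items
    = List.map (fun p => (p.1.1, p.1.2, p.2))
      (List.foldl
        (fun d (i : Int) => List.foldl (fun d (j : Int) => (pvCellB u v i.toNat j.toNat d).2) d
          (PySem.List.pyRange 1 ((v.toList.length : Int) + 1)))
        (List.foldl (fun d j => d.insert (0, j) (PySem.List.pyGetD fr j 0))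
          (List.foldl (fun d i => d.insert (i, 0) (PySem.List.pyGetD fc i 0)) PySem.Dict.empty
            (PySem.List.pyRange 0 ((u.toList.length : Int) + 1)))
          (PySem.List.pyRange 0 ((v.toList.length : Int) + 1)))
        (PySem.List.pyRange 1 ((u.toList.length : Int) + 1))).items := by
  refine congrArg (fun d : PySem.Dict (Int × Int) Int => List.map (fun p => (p.1.1, p.1.2, p.2)) d.items) ?_
  rw [pvInitA_eq u v fc fr]
  have h1 : ∀ j : Nat, j ≤ v.toList.length →
      (pvInitB u v fc fr).getD ((((1 : Nat)) : Int) - 1, (j : Int)) 0 = pvG u v fc fr (1 - 1) j := by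
    intro j hj
    have := pvInitB_getD_row0 u v fc fr j hj
    simp only [Nat.cast_one]
    norm_num
    exact this
  have hc1 : ∀ j : Nat, j ≤ v.toList.length →
      (pvInitB u v fc fr).contains ((((1 : Nat)) : Int) - 1, (j : Int)) = true := by
    intro j hj
    have := pvInitB_contains_row0 u v fc fr j hj
    simp only [Nat.cast_one]
    norm_num
    exact this
  have hgc : ∀ a : Nat, (1 : Nat) ≤ a → a ≤ u.toList.length →
      (pvInitB u v fc fr).getD ((a : Int), 0) 0 = pvG u v fc fr a 0 :=
    fun a ha1 ha2 => pvInitB_getD_col u v fc fr a ha1 ha2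
  have hcc : ∀ a : Nat, (1 : Nat) ≤ a → a ≤ u.toList.length →
      (pvInitB u v fc fr).contains ((a : Int), 0) = true :=
    fun a _ ha2 => pvInitB_contains_col u v fc fr a ha2
  have habs : ∀ a b : Nat, (1 : Nat) ≤ a → 1 ≤ b →
      (pvInitB u v fc fr).contains ((a : Int), (b : Int)) = false :=
    fun a b ha hb => pvInitB_contains u v fc fr a b ha hb
  have hA := pvFillA_eq u v fc fr u.toList.length 1 le_rfl (by omega) (pvInitB u v fc fr)
    h1 hgc habs
  have hB := pvFillB_eq u v fc fr u.toList.length 1 le_rfl (by omega) (pvInitB u v fc fr)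
    hc1 h1 hcc hgc habs
  simp only [Nat.cast_one] at hA hB
  rw [hA, hB]

-- ===== VERDICT (by name: the statement is the Claim_ definition above) =====
theorem construct_lcs_grid_spec : Claim_equal_construct_lcs_grid := by
  intro u v fc fr _ _
  unfold Spec_construct_lcs_grid construct_lcs_grid construct_lcs_grid_alt
  simp only [PySem.Str.len_eq]
  exact pvMain u v fc fr
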